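-- pv_equiv track=rewrite | github.com/saathvikb2005/DL_HACK | workpattern/integrated_monitor.py | get_time_based_tip
-- ===== SOURCE A (Python) =====
-- def get_time_based_tip(work_duration):
--     """Get wellness tip based on work duration"""
--     tips = {
--         15: "💡 Tip: Every 20 minutes, look at something 20 feet away for 20 seconds (20-20-20 rule)",
--         30: "💧 Tip: Stay hydrated! Take a sip of water",
--         45: "🧘 Tip: Time for a 5-minute stretch break",
--         60: "🚶 Tip: You've been working for 1 hour - take a short walk",
--         90: "☕ Tip: 90 minutes completed - consider a coffee/tea break",
--         120: "⚠️ Tip: 2 hours of work - take a 15-minute break to recharge"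
--     }
--
--     # Find the closest tip
--     for duration, tip in sorted(tips.items()):
--         if work_duration <= duration + 5:
--             return tip
--     return "💪 Tip: Great focus! Remember to take regular breaks"
-- ===== SOURCE B (Python) =====
-- def get_time_based_tip(work_duration):
--     """Get wellness tip based on work duration"""
--     boundaries = [20, 35, 50, 65, 95, 125]
--     tips = [
--         "\U0001F4A1 Tip: Every 20 minutes, look at something 20 feet away for 20 seconds (20-20-20 rule)",
--         "\U0001F4A7 Tip: Stay hydrated! Take a sip of water",
--         "\U0001F9D8 Tip: Time for a 5-minute stretch break",
--         "\U0001F6B6 Tip: You've been working for 1 hour - take a short walk",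
--         "\u2615 Tip: 90 minutes completed - consider a coffee/tea break",
--         "\u26A0\uFE0F Tip: 2 hours of work - take a 15-minute break to recharge",
--     ]
--     # binary search: first index with boundaries[i] >= work_duration
--     lo, hi = 0, len(boundaries)
--     while lo < hi:
--         mid = (lo + hi) // 2
--         if boundaries[mid] < work_duration:
--             lo = mid + 1
--         else:
--             hi = mid
--     if lo == len(boundaries):
--         return "\U0001F4AA Tip: Great focus! Remember to take regular breaks"
--     return tips[lo]
-- ===== Notes on version B (the rewrite author's own statement) =====
-- stated objective: idiomatic
-- what changed: Replaced the linear scan over sorted dict items (comparing work_duration <= key+5 at each step) with a binary search over a precomputed boundary table [20,35,50,65,95,125] paired with a parallel tip list.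
import Mathlib
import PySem

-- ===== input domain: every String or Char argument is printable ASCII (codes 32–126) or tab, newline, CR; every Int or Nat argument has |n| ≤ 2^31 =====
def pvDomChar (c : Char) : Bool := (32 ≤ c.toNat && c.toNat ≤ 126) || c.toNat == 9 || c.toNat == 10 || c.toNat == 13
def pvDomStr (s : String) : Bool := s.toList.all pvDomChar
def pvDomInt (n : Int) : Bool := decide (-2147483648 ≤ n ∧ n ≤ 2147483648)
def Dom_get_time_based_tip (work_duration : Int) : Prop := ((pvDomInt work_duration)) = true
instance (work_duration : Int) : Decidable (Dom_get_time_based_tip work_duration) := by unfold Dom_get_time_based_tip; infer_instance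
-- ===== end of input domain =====

-- B replaces A's linear scan over a sorted dict with a binary search over a precomputed
-- boundary table (objective: idiomatic/alternative; same exact return values).

-- ===== PORT A =====
-- A's loop: return first tip whose (duration + 5) is ≥ work_duration, else the fallback.
def pvTipLoop (work_duration : Int) : List (Int × String) → String
  | [] => "💪 Tip: Great focus! Remember to take regular breaks"
  | (duration, tip) :: rest =>
      if work_duration ≤ duration + 5 then tip else pvTipLoop work_duration rest

def get_time_based_tip (work_duration : Int) : String :=
  let tips : PySem.Dict Int String := PySem.Dict.ofList
    [(15, "💡 Tip: Every 20 minutes, look at something 20 feet away for 20 seconds (20-20-20 rule)"),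
     (30, "💧 Tip: Stay hydrated! Take a sip of water"),
     (45, "🧘 Tip: Time for a 5-minute stretch break"),
     (60, "🚶 Tip: You've been working for 1 hour - take a short walk"),
     (90, "☕ Tip: 90 minutes completed - consider a coffee/tea break"),
     (120, "⚠️ Tip: 2 hours of work - take a 15-minute break to recharge")]
  -- sorted(tips.items()): keys are distinct, so tuple order = order by first component
  pvTipLoop work_duration (PySem.List.sorted (PySem.Dict.items tips) (fun p => p.1))

-- ===== PORT B =====
-- Source B's while-loop: binary search for the first index with boundaries[i] ≥ work_duration.
-- boundaries[mid] is always in range here; getD 0 is exact for those accesses.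
def pvBisect (boundaries : List Int) (work_duration : Int) (lo hi : Nat) : Nat :=
  if lo < hi then
    let mid := (lo + hi) / 2
    if boundaries.getD mid 0 < work_duration then
      pvBisect boundaries work_duration (mid + 1) hi
    else
      pvBisect boundaries work_duration lo mid
  else lo
termination_by hi - lo
decreasing_by all_goals omega

def get_time_based_tip_alt (work_duration : Int) : String :=
  let boundaries : List Int := [20, 35, 50, 65, 95, 125]
  let tips : List String :=
    ["💡 Tip: Every 20 minutes, look at something 20 feet away for 20 seconds (20-20-20 rule)",
     "💧 Tip: Stay hydrated! Take a sip of water",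
     "🧘 Tip: Time for a 5-minute stretch break",
     "🚶 Tip: You've been working for 1 hour - take a short walk",
     "☕ Tip: 90 minutes completed - consider a coffee/tea break",
     "⚠️ Tip: 2 hours of work - take a 15-minute break to recharge"]
  let lo := pvBisect boundaries work_duration 0 boundaries.length
  if lo = boundaries.length then "💪 Tip: Great focus! Remember to take regular breaks"
  else tips.getD lo ""

-- ===== PRECONDITION & SPEC =====
def Spec_get_time_based_tip (work_duration : Int) (out : String) : Prop := out = get_time_based_tip_alt work_duration
instance (work_duration : Int) (out : String) : Decidable (Spec_get_time_based_tip work_duration out) := by unfold Spec_get_time_based_tip; infer_instance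

-- ===== CLAIM (what is proved, stated in full; the proofs are below) =====
def Claim_equal_get_time_based_tip : Prop := ∀ (work_duration : Int), Dom_get_time_based_tip work_duration → Spec_get_time_based_tip work_duration (get_time_based_tip work_duration)

-- ===== LEMMAS AND PROOFS =====

-- ===== VERDICT (by name: the statement is the Claim_ definition above) =====
set_option maxRecDepth 4000 in
theorem get_time_based_tip_spec : Claim_equal_get_time_based_tip := by
  intro wd _
  unfold Spec_get_time_based_tip get_time_based_tip get_time_based_tip_alt
  have hs : PySem.List.sorted (PySem.Dict.items (PySem.Dict.ofList
      [((15:Int), "💡 Tip: Every 20 minutes, look at something 20 feet away for 20 seconds (20-20-20 rule)"),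
       (30, "💧 Tip: Stay hydrated! Take a sip of water"),
       (45, "🧘 Tip: Time for a 5-minute stretch break"),
       (60, "🚶 Tip: You've been working for 1 hour - take a short walk"),
       (90, "☕ Tip: 90 minutes completed - consider a coffee/tea break"),
       (120, "⚠️ Tip: 2 hours of work - take a 15-minute break to recharge")])) (fun p => p.1) =
      [((15:Int), "💡 Tip: Every 20 minutes, look at something 20 feet away for 20 seconds (20-20-20 rule)"),
       (30, "💧 Tip: Stay hydrated! Take a sip of water"),
       (45, "🧘 Tip: Time for a 5-minute stretch break"),
       (60, "🚶 Tip: You've been working for 1 hour - take a short walk"),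
       (90, "☕ Tip: 90 minutes completed - consider a coffee/tea break"),
       (120, "⚠️ Tip: 2 hours of work - take a 15-minute break to recharge")] := by rfl
  simp only [hs, pvTipLoop]
  simp [pvBisect, List.getD]
  split_ifs <;> first | rfl | omega | exact False.elim (by assumption)
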